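-- pv_equiv track=rewrite | github.com/leifheaney5/PrisonersDilemmaSim | pages/game_logic.py | _is_proth
-- ===== SOURCE A (Python) =====
-- def _is_proth(n: int) -> bool:
--     """
--     Proth number test: n = k*2^m + 1 with k odd, m>0 and 2^m > k.
--
--     Reference definition: https://www.numbersaplenty.com/set/Proth_number/
--     """
--
--     n = int(n)
--     if n <= 2:
--         return False
--     x = n - 1
--     # Factor out powers of 2: x = k * 2^m
--     m = 0
--     while x % 2 == 0:
--         x //= 2
--         m += 1
--         k = x
--         if m > 0 and (k % 2 == 1) and (2**m > k):
--             return True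
--     return False
-- ===== SOURCE B (Python) =====
-- def _is_proth(n: int) -> bool:
--     n = int(n)
--     if n <= 2:
--         return False
--     x = n - 1
--     p = x & -x          # lowest set bit = largest power of two dividing x
--     return p > 1 and p * p > x
-- ===== Notes on version B (the rewrite author's own statement) =====
-- stated objective: idiomatic
-- what changed: A strips factors of two from the predecessor of n with a while loop, testing the Proth condition at each step; B extracts the largest power of two dividing that predecessor in closed form via the lowest-set-bit trick (x & -x) and tests the condition once, with no loop.
import Mathlib
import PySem

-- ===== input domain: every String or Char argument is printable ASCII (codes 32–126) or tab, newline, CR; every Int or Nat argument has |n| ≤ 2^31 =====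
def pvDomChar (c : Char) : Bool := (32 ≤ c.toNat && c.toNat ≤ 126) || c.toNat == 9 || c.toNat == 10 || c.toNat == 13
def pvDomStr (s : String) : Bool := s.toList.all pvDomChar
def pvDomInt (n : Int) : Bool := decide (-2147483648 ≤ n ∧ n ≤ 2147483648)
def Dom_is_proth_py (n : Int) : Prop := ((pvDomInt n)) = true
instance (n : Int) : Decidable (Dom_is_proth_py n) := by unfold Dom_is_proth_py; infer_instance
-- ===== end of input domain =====

-- B replaces A's trial-division loop by a closed-form bitwise test (p = x & -x, the
-- largest power of two dividing x); same result, no loop (objective: idiomatic/alternative).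

-- ===== PORT A =====
-- A's while loop; the '0 < x' guard only makes the recursion total: A's loop is entered
-- with x = n - 1 ≥ 2 and x stays positive, so the guard never changes the computed value
-- on reachable states (for x ≤ 0 even, Python's loop would not terminate either way).
def prothLoop (x : Int) (m : Int) : Bool :=
  if _h : x % 2 = 0 ∧ 0 < x then
    let x' := PySem.Int.floordiv x 2
    let m' := m + 1
    let k := x'
    if m' > 0 ∧ k % 2 = 1 ∧ (2 : Int) ^ m'.toNat > k then true
    else prothLoop x' m'
  else false
termination_by x.toNat
decreasing_by
  rw [PySem.Int.floordiv_eq_ediv_of_pos (by norm_num)]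
  omega

def is_proth_py (n : Int) : Bool :=
  if n ≤ 2 then false
  else prothLoop (n - 1) 0

-- ===== PORT B =====
def is_proth_py_alt (n : Int) : Bool :=
  if n ≤ 2 then false
  else
    let x := n - 1
    let p := Int.land x (-x)   -- Python: x & -x, lowest set bit of x
    decide (p > 1 ∧ p * p > x)

-- ===== PRECONDITION & SPEC =====
def Spec_is_proth_py (n : Int) (out : Bool) : Prop := out = is_proth_py_alt n
instance (n : Int) (out : Bool) : Decidable (Spec_is_proth_py n out) := by unfold Spec_is_proth_py; infer_instance

-- ===== CLAIM (what is proved, stated in full; the proofs are below) =====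
def Claim_equal_is_proth_py : Prop := ∀ (n : Int), Dom_is_proth_py n → Spec_is_proth_py n (is_proth_py n)

-- ===== LEMMAS AND PROOFS =====

theorem ldiff_pred_odd (a : Nat) (h : a % 2 = 1) : Nat.ldiff a (a - 1) = 1 := by
  apply Nat.eq_of_testBit_eq
  intro i
  cases i with
  | zero =>
      rw [Nat.testBit_ldiff]
      have h1 : ¬ ((a - 1) % 2 = 1) := by omega
      simp [Nat.testBit_zero, h, h1]
  | succ i =>
      rw [Nat.testBit_ldiff]
      simp only [Nat.testBit_succ]
      have h1 : a / 2 = (a - 1) / 2 := by omega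
      rw [h1]
      simp

theorem ldiff_pred_even (a : Nat) (h0 : 0 < a) (h : a % 2 = 0) :
    Nat.ldiff a (a - 1) = 2 * Nat.ldiff (a / 2) (a / 2 - 1) := by
  apply Nat.eq_of_testBit_eq
  intro i
  cases i with
  | zero =>
      rw [Nat.testBit_ldiff]
      have h1 : ¬ (a % 2 = 1) := by omega
      have h2 : ¬ (2 * Nat.ldiff (a / 2) (a / 2 - 1) % 2 = 1) := by omega
      simp [Nat.testBit_zero, h1]
  | succ i =>
      rw [Nat.testBit_ldiff]
      simp only [Nat.testBit_succ]
      have h1 : (a - 1) / 2 = a / 2 - 1 := by omega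
      have h2 : 2 * Nat.ldiff (a / 2) (a / 2 - 1) / 2 = Nat.ldiff (a / 2) (a / 2 - 1) := by omega
      rw [h1, h2, Nat.testBit_ldiff]

theorem neg_ofNat_pos (a : Nat) (h : 0 < a) : -((a : Nat) : Int) = Int.negSucc (a - 1) := by
  cases a with
  | zero => omega
  | succ b =>
      simp only [Int.negSucc_eq, Nat.succ_sub_one]
      push_cast
      ring

theorem land_neg_ofNat (a : Nat) (h : 0 < a) :
    Int.land ((a : Nat) : Int) (-((a : Nat) : Int)) = ((Nat.ldiff a (a - 1) : Nat) : Int) := by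
  rw [neg_ofNat_pos a h]
  rfl

theorem land_neg_self_odd (x : Int) (hx : 0 < x) (h : x % 2 = 1) :
    Int.land x (-x) = 1 := by
  obtain ⟨a, rfl⟩ : ∃ a : Nat, x = ((a : Nat) : Int) := ⟨x.toNat, by omega⟩
  have ha : 0 < a := by omega
  rw [land_neg_ofNat a ha, ldiff_pred_odd a (by omega)]
  rfl

theorem land_neg_self_even (x : Int) (hx : 0 < x) (h : x % 2 = 0) :
    Int.land x (-x) = 2 * Int.land (x / 2) (-(x / 2)) := by
  obtain ⟨a, rfl⟩ : ∃ a : Nat, x = ((a : Nat) : Int) := ⟨x.toNat, by omega⟩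
  have ha : 0 < a := by omega
  have ha2 : 0 < a / 2 := by omega
  have hdiv : ((a : Nat) : Int) / 2 = ((a / 2 : Nat) : Int) := by
    exact (Int.natCast_div a 2).symm
  rw [hdiv, land_neg_ofNat a ha, land_neg_ofNat (a / 2) ha2,
      ldiff_pred_even a ha (by omega)]
  push_cast
  ring

theorem land_neg_self_pos (x : Int) (hx : 0 < x) : 1 ≤ Int.land x (-x) := by
  generalize hfuel : x.toNat = fuel
  induction fuel using Nat.strong_induction_on generalizing x with
  | _ fuel ih =>
    by_cases hpar : x % 2 = 1
    · rw [land_neg_self_odd x hx hpar]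
    · have he : x % 2 = 0 := by omega
      rw [land_neg_self_even x hx he]
      have h2 : 0 < x / 2 := by omega
      have := ih ((x / 2).toNat) (by omega) (x / 2) h2 rfl
      omega

theorem prothLoop_eq (x : Int) (m : Int) (hx : 0 < x) (hm : 0 ≤ m) :
    prothLoop x m =
      decide (x % 2 = 0 ∧ 2 ^ m.toNat * (Int.land x (-x)) ^ 2 > x) := by
  generalize hfuel : x.toNat = fuel
  induction fuel using Nat.strong_induction_on generalizing x m with
  | _ fuel ih =>
    by_cases hpar : x % 2 = 1
    · rw [prothLoop.eq_def]
      have : ¬ (x % 2 = 0 ∧ 0 < x) := by omega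
      simp [hpar]
    · have he : x % 2 = 0 := by omega
      have hfd : PySem.Int.floordiv x 2 = x / 2 :=
        PySem.Int.floordiv_eq_ediv_of_pos (by omega)
      have hx2 : 0 < x / 2 := by omega
      have hmt : (m + 1).toNat = m.toNat + 1 := by omega
      rw [prothLoop.eq_def]
      simp only [he, hx, and_self, dite_true, hfd]
      by_cases hpar2 : (x / 2) % 2 = 1
      · -- x/2 odd: inner check decides the result
        have hgt : m + 1 > 0 := by omega
        have hp : Int.land x (-x) = 2 := by
          rw [land_neg_self_even x hx he, land_neg_self_odd (x / 2) hx2 hpar2]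
          norm_num
        have e5 : (2 : Int) ^ (m + 1).toNat = 2 * 2 ^ m.toNat := by rw [hmt]; ring
        by_cases hcond : (2 : Int) ^ (m + 1).toNat > x / 2
        · have h1 : x < 2 ^ m.toNat * 4 := by
            rw [e5] at hcond
            generalize (2 : Int) ^ m.toNat = t at hcond
            omega
          rw [hp]
          simp only [hgt, hpar2, hcond, and_self, if_true, true_and]
          have h2 : (2 : Int) ^ 2 = 4 := by norm_num
          simp [h2, h1]
        · have h1 : ¬ (x < 2 ^ m.toNat * 4) := by
            rw [e5] at hcond
            generalize (2 : Int) ^ m.toNat = t at hcond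
            omega
          simp only [hcond, and_false, if_false]
          rw [ih ((x / 2).toNat) (by omega) (x / 2) (m + 1) hx2 (by omega) rfl]
          rw [land_neg_self_odd (x / 2) hx2 hpar2, hp]
          have h2 : (2 : Int) ^ 2 = 4 := by norm_num
          simp [hpar2, h2, h1]
      · -- x/2 even: recurse
        have hpar2' : (x / 2) % 2 = 0 := by omega
        simp only [hpar2, false_and, and_false, if_false]
        rw [ih ((x / 2).toNat) (by omega) (x / 2) (m + 1) hx2 (by omega) rfl]
        rw [land_neg_self_even x hx he]
        set q := Int.land (x / 2) (-(x / 2)) with hq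
        have iff1 : (2 ^ (m + 1).toNat * q ^ 2 > x / 2) ↔ (2 ^ m.toNat * (2 * q) ^ 2 > x) := by
          have e3 : (2 : Int) ^ (m + 1).toNat * q ^ 2 = 2 * (2 ^ m.toNat * q ^ 2) := by
            rw [hmt]; ring
          have e4 : (2 : Int) ^ m.toNat * (2 * q) ^ 2 = 4 * (2 ^ m.toNat * q ^ 2) := by ring
          rw [e3, e4]
          generalize (2 : Int) ^ m.toNat * q ^ 2 = t
          omega
        by_cases hc : 2 ^ (m + 1).toNat * q ^ 2 > x / 2
        · simp [hpar2', hc, iff1.mp hc]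
        · have hnot := (not_iff_not.mpr iff1).mp hc
          simp [hpar2', hc, hnot]

-- ===== VERDICT (by name: the statement is the Claim_ definition above) =====
theorem is_proth_py_spec : Claim_equal_is_proth_py := by
  intro n _
  unfold Spec_is_proth_py is_proth_py is_proth_py_alt
  by_cases hle : n ≤ 2
  · simp [hle]
  · simp only [hle, if_false]
    have hx : 0 < n - 1 := by omega
    rw [prothLoop_eq (n - 1) 0 hx (le_refl 0)]
    set x := n - 1 with hxdef
    set p := Int.land x (-x) with hp
    by_cases hpar : x % 2 = 1
    · have h1 : p = 1 := land_neg_self_odd x hx hpar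
      simp [h1, hpar]
    · have he : x % 2 = 0 := by omega
      have hx2 : 0 < x / 2 := by omega
      have hp2 : p = 2 * Int.land (x / 2) (-(x / 2)) := land_neg_self_even x hx he
      have hpos := land_neg_self_pos (x / 2) hx2
      have hgt1 : p > 1 := by omega
      have e : (2 : Int) ^ (0 : Int).toNat * p ^ 2 = p * p := by
        norm_num; ring
      rw [e]
      simp [he, hgt1]
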